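-- pv_equiv track=rewrite | github.com/jarmax01/PythonResearches | maths/Binary.py | decodeToNumber
-- ===== SOURCE A (Python) =====
-- def decodeToNumber(binary):
--     number = 0
--     power_position = 0
--     binary.reverse()
--     for i in binary:
--         local_octet = i
--         local_octet.reverse()
--         for i in local_octet :
--             if i == 1:
--                 number+=(2**power_position)
--             power_position+=1
--         local_octet.reverse()
--     binary.reverse()
--     return number
-- ===== SOURCE B (Python) =====
-- def decodeToNumber(binary):
--     number = 0
--     for octet in binary:
--         for bit in octet:
--             number = number * 2 + (1 if bit == 1 else 0)
--     return number
-- ===== Notes on version B (the rewrite author's own statement) =====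
-- stated objective: simpler
-- what changed: Replaces the double-reversal and explicit power_position counter with a single forward Horner pass (number = number*2 + bit), also removing A's temporary in-place mutation of the argument.
import Mathlib
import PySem

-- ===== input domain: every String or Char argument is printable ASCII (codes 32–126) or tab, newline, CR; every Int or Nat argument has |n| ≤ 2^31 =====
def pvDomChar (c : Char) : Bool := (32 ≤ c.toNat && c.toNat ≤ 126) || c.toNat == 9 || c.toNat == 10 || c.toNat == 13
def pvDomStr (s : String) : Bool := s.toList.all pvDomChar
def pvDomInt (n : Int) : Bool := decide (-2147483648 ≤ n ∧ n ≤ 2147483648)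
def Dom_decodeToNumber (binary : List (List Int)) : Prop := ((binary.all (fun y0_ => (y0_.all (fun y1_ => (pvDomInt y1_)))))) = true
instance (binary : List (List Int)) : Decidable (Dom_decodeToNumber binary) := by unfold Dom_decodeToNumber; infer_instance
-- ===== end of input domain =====

-- B: single forward Horner pass instead of A's double reversal with a power counter; A temporarily
-- reverses its argument in place but restores it, so only the return value is at stake.
-- ===== PORT A =====
-- state = (number, power_position); A iterates binary reversed, each octet reversed
def decodeToNumber (binary : List (List Int)) : Int :=
  ((binary.reverse).foldl (fun (st : Int × Nat) i =>
      (i.reverse).foldl (fun (st : Int × Nat) i =>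
        ((if i == 1 then st.1 + 2 ^ st.2 else st.1), st.2 + 1)) st) ((0 : Int), (0 : Nat))).1

-- ===== PORT B =====
def decodeToNumber_alt (binary : List (List Int)) : Int :=
  binary.foldl (fun number octet =>
    octet.foldl (fun number bit => number * 2 + (if bit == 1 then 1 else 0)) number) 0

-- ===== PRECONDITION & SPEC =====
def Spec_decodeToNumber (binary : List (List Int)) (out : Int) : Prop := out = decodeToNumber_alt binary
instance (binary : List (List Int)) (out : Int) : Decidable (Spec_decodeToNumber binary out) := by unfold Spec_decodeToNumber; infer_instance

-- ===== CLAIM (what is proved, stated in full; the proofs are below) =====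
def Claim_equal_decodeToNumber : Prop := ∀ (binary : List (List Int)), Dom_decodeToNumber binary → Spec_decodeToNumber binary (decodeToNumber binary)

-- ===== LEMMAS AND PROOFS =====

def pvG (st : Int × Nat) (i : Int) : Int × Nat :=
  ((if i == 1 then st.1 + 2 ^ st.2 else st.1), st.2 + 1)

def pvH (n : Int) (b : Int) : Int := n * 2 + (if b == 1 then 1 else 0)

theorem pvG_snd (l : List Int) (st : Int × Nat) :
    (l.foldl pvG st).2 = st.2 + l.length := by
  induction l generalizing st with
  | nil => simp [List.foldl]
  | cons b t ih => simp [List.foldl, pvG, ih]; omega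

theorem pvH_shift (t : List Int) (a : Int) :
    t.foldl pvH a = a * 2 ^ t.length + t.foldl pvH 0 := by
  induction t generalizing a with
  | nil => simp [List.foldl]
  | cons c t ih =>
      rw [List.foldl_cons, List.foldl_cons, ih (pvH a c), ih (pvH 0 c)]
      simp only [pvH, List.length_cons]
      ring

theorem pvG_rev (l : List Int) (n : Int) (p : Nat) :
    (l.reverse.foldl pvG (n, p)).1 = n + (l.foldl pvH 0) * 2 ^ p := by
  induction l generalizing n p with
  | nil => simp [List.foldl]
  | cons b t ih =>
      rw [List.reverse_cons, List.foldl_append]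
      have h2 : (t.reverse.foldl pvG (n, p)).2 = p + t.length := by
        rw [pvG_snd]; simp
      rw [List.foldl_cons, List.foldl_nil]
      simp only [pvG, h2, ih]
      rw [List.foldl_cons, pvH_shift t (pvH 0 b)]
      simp only [pvH]
      split <;> ring

theorem pv_foldA_flat (l : List (List Int)) (st : Int × Nat) :
    l.reverse.foldl (fun st oct => oct.reverse.foldl pvG st) st
      = (l.flatMap id).reverse.foldl pvG st := by
  induction l generalizing st with
  | nil => simp
  | cons o t ih =>
      simp only [List.reverse_cons, List.foldl_append, List.foldl_cons, List.foldl_nil,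
        List.flatMap_cons, List.reverse_append, id]
      rw [ih]

theorem pv_foldB_flat (l : List (List Int)) (n : Int) :
    l.foldl (fun n oct => oct.foldl pvH n) n = (l.flatMap id).foldl pvH n := by
  induction l generalizing n with
  | nil => simp
  | cons o t ih =>
      simp only [List.foldl_cons, List.flatMap_cons, List.foldl_append, id]
      rw [ih]

-- ===== VERDICT (by name: the statement is the Claim_ definition above) =====
theorem decodeToNumber_spec : Claim_equal_decodeToNumber := by
  intro binary _
  unfold Spec_decodeToNumber decodeToNumber decodeToNumber_alt
  show (binary.reverse.foldl (fun st oct => oct.reverse.foldl pvG st) ((0:Int),(0:Nat))).1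
      = binary.foldl (fun n oct => oct.foldl pvH n) 0
  rw [pv_foldA_flat, pv_foldB_flat, pvG_rev]
  simp
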